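-- pv_equiv track=rewrite | github.com/AlbertMargaryan/Python_CPS109_Problems_Solution | problems-seperately/colourTrio.py | colourTrio
-- ===== SOURCE A (Python) =====
-- def colourTrio(color):
--   colorList = list(color)
--   newColorList = []
--   if len(colorList) == 1:
--     return colorList[0]
--   for i, v in enumerate(colorList):
--     if i + 1 != len(colorList):
--       v2 = colorList[i + 1]
--       if v == v2:
--         newColorList.append(v)
--       elif (v == "r" or v2 == "r") and (v == "b" or v2 == "b"):
--         newColorList.append("y")
--       elif (v == "y" or v2 == "y") and (v == "b" or v2 == "b"):
--         newColorList.append("r")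
--       elif (v == "r" or v2 == "r") and (v == "y" or v2 == "y"):
--         newColorList.append("b")
--   return colourTrio("".join(newColorList))
-- ===== SOURCE B (Python) =====
-- def binom3(n, k):
--     # C(n, k) mod 3 by Lucas' theorem (base-3 digits).
--     r = 1
--     while n or k:
--         nd, kd = n % 3, k % 3
--         if kd > nd:
--             return 0
--         r = (r * ((1, 1, 1), (0, 1, 2), (0, 0, 1))[kd][nd]) % 3  # C(nd, kd) mod 3
--         n //= 3
--         k //= 3
--     return r
--
--
-- def colourTrio(color):
--     if len(color) == 1:
--         return color
--     val = {'r': 0, 'y': 1, 'b': 2}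
--     m = len(color) - 1
--     s = 0
--     for i, ch in enumerate(color):
--         s = (s + binom3(m, i) * val[ch]) % 3
--     if m % 2 == 1:
--         s = (-s) % 3
--     return "ryb"[s]
-- ===== Notes on version B (the rewrite author's own statement) =====
-- stated objective: alternative
-- what changed: Replaces A's repeated pairwise-reduction recursion by a closed form: apex = (-1)^(n-1) * sum C(n-1,i)*colour_i mod 3, with each binomial coefficient mod 3 computed by Lucas' theorem on base-3 digits (asymptotically better, but a timing run's large inputs lie outside Pre_, so no speed is claimed).
-- outside the precondition, e.g. on colourTrio('aa'): A returns 'a', B raises KeyError; on colourTrio(''): A raises RecursionError, B returns 'r'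
import Mathlib
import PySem

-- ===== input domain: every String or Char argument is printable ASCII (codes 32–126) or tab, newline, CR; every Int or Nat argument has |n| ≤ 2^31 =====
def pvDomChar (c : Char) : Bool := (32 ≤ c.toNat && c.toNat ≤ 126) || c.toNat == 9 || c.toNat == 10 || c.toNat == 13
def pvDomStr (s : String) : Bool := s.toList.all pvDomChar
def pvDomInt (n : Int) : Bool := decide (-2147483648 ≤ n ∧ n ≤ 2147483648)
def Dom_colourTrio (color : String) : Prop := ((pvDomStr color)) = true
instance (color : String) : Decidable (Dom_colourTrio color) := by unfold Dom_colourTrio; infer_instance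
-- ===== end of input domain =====

-- B replaces A's repeated pairwise reduction by the closed form
-- apex = (-1)^(n-1) * Σ C(n-1,i)·colour_i (mod 3), binomials mod 3 via Lucas' theorem (objective: alternative).

-- ===== PORT A =====
-- the body of A's for-loop: build newColorList from adjacent pairs (colorList[i], colorList[i+1])
def pvStepA (cs : List Char) : List Char :=
  (PySem.List.enumerate cs).foldl (fun acc iv =>
    if iv.1 + 1 ≠ (cs.length : Int) then
      match PySem.List.pyGet? cs (iv.1 + 1) with
      | some v2 =>
        if iv.2 = v2 then acc ++ [iv.2]
        else if (iv.2 = 'r' ∨ v2 = 'r') ∧ (iv.2 = 'b' ∨ v2 = 'b') then acc ++ ['y']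
        else if (iv.2 = 'y' ∨ v2 = 'y') ∧ (iv.2 = 'b' ∨ v2 = 'b') then acc ++ ['r']
        else if (iv.2 = 'r' ∨ v2 = 'r') ∧ (iv.2 = 'y' ∨ v2 = 'y') then acc ++ ['b']
        else acc
      | none => acc   -- unreachable: here i + 1 < len(colorList)
    else acc) []

-- A recurses on the joined list; fuel makes the recursion total (on inputs where the Python
-- does not terminate — e.g. the empty string — the fuel runs out; those inputs are outside Pre_).
def colourTrioAux : Nat → List Char → String
  | 0, _ => ""
  | fuel + 1, cs =>
    if cs.length = 1 then String.singleton (cs.getD 0 ' ')   -- return colorList[0]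
    else colourTrioAux fuel (pvStepA cs)

def colourTrio (color : String) : String :=
  colourTrioAux (color.toList.length + 1) color.toList

-- ===== PORT B =====
-- C(nd, kd) mod 3 for digits nd, kd < 3: the literal table ((1,1,1),(0,1,2),(0,0,1))[kd][nd] of Source B
def pvPasc (nd kd : Nat) : Nat :=
  (((([1, 1, 1], [0, 1, 2]), [0, 0, 1]).1.1 :: ((([1, 1, 1], [0, 1, 2]), [0, 0, 1]).1.2 :: [(([1, 1, 1], [0, 1, 2]), [0, 0, 1]).2])).getD kd []).getD nd 0

-- Source B's binom3 while-loop as recursion on the base-3 digits (args are the Nats n, k ≥ 0 Source B calls it with;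
-- Nat's % and / agree with Python's on nonnegative operands)
def pvBinom3 (n k : Nat) : Nat :=
  if n = 0 ∧ k = 0 then 1
  else if n % 3 < k % 3 then 0
  else (pvPasc (n % 3) (k % 3) * pvBinom3 (n / 3) (k / 3)) % 3
termination_by n + k
decreasing_by omega

-- val[ch]; Python raises KeyError on other chars (outside Pre_), junk value 0 there
def pvVal (c : Char) : Nat :=
  if c = 'r' then 0 else if c = 'y' then 1 else if c = 'b' then 2 else 0

def colourTrio_alt (color : String) : String :=
  let cs := color.toList
  if cs.length = 1 then color
  else
    let m := cs.length - 1
    let s := (cs.zipIdx).foldl (fun s p => (s + pvBinom3 m p.2 * pvVal p.1) % 3) 0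
    -- Python's (-s) % 3 with 0 ≤ s < 3 is (3 - s) % 3
    let s := if m % 2 = 1 then (3 - s) % 3 else s
    match PySem.Str.pyGet? "ryb" (s : Int) with   -- "ryb"[s]
    | some c => String.singleton c
    | none => ""

-- ===== PRECONDITION & SPEC =====
-- Pre_ excludes the empty string and multi-character strings containing a character outside the
-- three colour letters r, y, b: there A either never terminates (RecursionError: dropped pairs
-- shrink the string to "") or returns a value that is an accident of silently dropping pairs,
-- while B's colour-value lookup raises KeyError.
def Pre_colourTrio (color : String) : Prop :=
  color.toList.length = 1 ∨
    (2 ≤ color.toList.length ∧ (color.toList.all fun c => c = 'r' || c = 'y' || c = 'b') = true)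
instance (color : String) : Decidable (Pre_colourTrio color) := by unfold Pre_colourTrio; infer_instance

def pvWitness_colourTrio : String := "rybryb"

def Spec_colourTrio (color : String) (out : String) : Prop := out = colourTrio_alt color
instance (color : String) (out : String) : Decidable (Spec_colourTrio color out) := by unfold Spec_colourTrio; infer_instance

-- ===== CLAIM (what is proved, stated in full; the proofs are below) =====
def Claim_equal_colourTrio : Prop := ∀ (color : String), Dom_colourTrio color → Pre_colourTrio color → Spec_colourTrio color (colourTrio color)

-- ===== LEMMAS AND PROOFS =====

-- colour values in ZMod 3 and the inverse character map
def pvV (c : Char) : ZMod 3 := if c = 'r' then 0 else if c = 'y' then 1 else 2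
def pvChr (z : ZMod 3) : Char := if z = 0 then 'r' else if z = 1 then 'y' else 'b'

def pvRYB (c : Char) : Prop := c = 'r' ∨ c = 'y' ∨ c = 'b'

-- what A's branch chain appends for one adjacent pair
def pvCombL (a b : Char) : List Char :=
  if a = b then [a]
  else if (a = 'r' ∨ b = 'r') ∧ (a = 'b' ∨ b = 'b') then ['y']
  else if (a = 'y' ∨ b = 'y') ∧ (a = 'b' ∨ b = 'b') then ['r']
  else if (a = 'r' ∨ b = 'r') ∧ (a = 'y' ∨ b = 'y') then ['b']
  else []

-- one reduction step, arithmetically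
def pvComb (a b : Char) : Char := pvChr (-(pvV a + pvV b))

-- A's closed form: (-1)^(n-1) · Σ C(n-1,i)·v(cs[i])
def pvF (cs : List Char) : ZMod 3 :=
  (-1) ^ (cs.length - 1) *
    ∑ i ∈ Finset.range cs.length, (Nat.choose (cs.length - 1) i : ZMod 3) * pvV (cs.getD i 'r')

theorem pvChr_pvV {c : Char} (h : pvRYB c) : pvChr (pvV c) = c := by
  rcases h with h | h | h <;> subst h <;> decide

theorem pvV_pvChr (z : ZMod 3) : pvV (pvChr z) = z := by revert z; decide

theorem pvRYB_pvChr (z : ZMod 3) : pvRYB (pvChr z) := by revert z; unfold pvRYB; decide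

theorem pvCombL_eq {a b : Char} (ha : pvRYB a) (hb : pvRYB b) : pvCombL a b = [pvComb a b] := by
  rcases ha with h | h | h <;> rcases hb with h' | h' | h' <;> subst h h' <;> decide

-- the fold of A's loop over the tail of the list, with absolute indices
theorem pvStepA_fold (full : List Char) :
    ∀ (suf pre acc : List Char), full = pre ++ suf →
      (PySem.List.enumerate suf (pre.length : Int)).foldl (fun acc iv =>
        if iv.1 + 1 ≠ (full.length : Int) then
          match PySem.List.pyGet? full (iv.1 + 1) with
          | some v2 =>
            if iv.2 = v2 then acc ++ [iv.2]
            else if (iv.2 = 'r' ∨ v2 = 'r') ∧ (iv.2 = 'b' ∨ v2 = 'b') then acc ++ ['y']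
            else if (iv.2 = 'y' ∨ v2 = 'y') ∧ (iv.2 = 'b' ∨ v2 = 'b') then acc ++ ['r']
            else if (iv.2 = 'r' ∨ v2 = 'r') ∧ (iv.2 = 'y' ∨ v2 = 'y') then acc ++ ['b']
            else acc
          | none => acc
        else acc) acc
      = acc ++ (List.zipWith pvCombL suf suf.tail).flatten := by
  intro suf
  induction suf with
  | nil => intro pre acc _; simp [PySem.List.enumerate]
  | cons a suf ih =>
    intro pre acc hfull
    rw [PySem.List.enumerate_cons, List.foldl_cons]
    have hlen1 : ((pre.length : Int) + 1) = (((pre ++ [a]).length : Nat) : Int) := by simp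
    cases suf with
    | nil =>
      -- a is the last element: i + 1 == len(colorList), nothing is appended
      subst hfull
      simp [PySem.List.enumerate]
    | cons b rest =>
      have hne : ¬ ((pre.length : Int) + 1 ≠ (full.length : Int)) ↔ False := by
        subst hfull; simp; omega
      have hget : PySem.List.pyGet? full ((pre.length : Int) + 1) = some b := by
        subst hfull
        rw [hlen1, PySem.List.pyGet?_natCast]
        simp
      simp only [hget, if_pos (by simpa using hne)]
      rw [hlen1, ih (pre ++ [a]) _ (by simpa [List.append_assoc] using hfull)]
      have hcomb : (if a = b then acc ++ [a]
            else if (a = 'r' ∨ b = 'r') ∧ (a = 'b' ∨ b = 'b') then acc ++ ['y']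
            else if (a = 'y' ∨ b = 'y') ∧ (a = 'b' ∨ b = 'b') then acc ++ ['r']
            else if (a = 'r' ∨ b = 'r') ∧ (a = 'y' ∨ b = 'y') then acc ++ ['b']
            else acc) = acc ++ pvCombL a b := by
        unfold pvCombL; split_ifs <;> simp
      rw [hcomb]
      simp [List.append_assoc]

theorem pvStepA_eq (cs : List Char) :
    pvStepA cs = (List.zipWith pvCombL cs cs.tail).flatten := by
  simpa [pvStepA] using pvStepA_fold cs cs [] [] rfl

theorem pvStepA_ryb (cs : List Char) (h : ∀ c ∈ cs, pvRYB c) :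
    pvStepA cs = List.zipWith pvComb cs cs.tail := by
  rw [pvStepA_eq]
  induction cs with
  | nil => simp
  | cons a t ih =>
    cases t with
    | nil => simp
    | cons b r =>
      simp only [List.tail_cons, List.zipWith_cons_cons, List.flatten_cons]
      rw [pvCombL_eq (h a (by simp)) (h b (by simp))]
      have := ih (fun c hc => h c (List.mem_cons_of_mem a hc))
      simp only [List.tail_cons] at this
      simp [this]

-- Pascal shift for the weighted sum
theorem pvSumPascal (x : ℕ → ZMod 3) (n : ℕ) :
    ∑ j ∈ Finset.range (n + 2), (Nat.choose (n + 1) j : ZMod 3) * x j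
      = (∑ i ∈ Finset.range (n + 1), (Nat.choose n i : ZMod 3) * x i)
        + ∑ i ∈ Finset.range (n + 1), (Nat.choose n i : ZMod 3) * x (i + 1) := by
  rw [Finset.sum_range_succ' (fun j => (Nat.choose (n + 1) j : ZMod 3) * x j) (n + 1)]
  rw [Finset.sum_range_succ' (fun i => (Nat.choose n i : ZMod 3) * x i) n]
  have hext : ∑ j ∈ Finset.range (n + 1), (Nat.choose n (j + 1) : ZMod 3) * x (j + 1)
      = ∑ j ∈ Finset.range n, (Nat.choose n (j + 1) : ZMod 3) * x (j + 1) := by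
    rw [Finset.sum_range_succ, Nat.choose_succ_self]; simp
  simp only [Nat.choose_succ_succ, Nat.cast_add, add_mul, Finset.sum_add_distrib,
    Nat.choose_zero_right, Nat.cast_one, one_mul]
  rw [hext]
  abel

-- one reduction step preserves pvF
theorem pvF_step (cs : List Char) (h : 2 ≤ cs.length) :
    pvF (List.zipWith pvComb cs cs.tail) = pvF cs := by
  obtain ⟨n, hn⟩ : ∃ n, cs.length = n + 2 := ⟨cs.length - 2, by omega⟩
  have htail : cs.tail.length = n + 1 := by simp [hn]
  have hds : (List.zipWith pvComb cs cs.tail).length = n + 1 := by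
    simp [List.length_zipWith, hn, htail]
  have hgd : ∀ i, i < n + 1 →
      pvV ((List.zipWith pvComb cs cs.tail).getD i 'r')
        = -(pvV (cs.getD i 'r') + pvV (cs.getD (i + 1) 'r')) := by
    intro i hi
    have hi' : i < (List.zipWith pvComb cs cs.tail).length := by omega
    have h1 : i < cs.length := by omega
    have h1' : i + 1 < cs.length := by omega
    have h2 : i < cs.tail.length := by omega
    rw [List.getD_eq_getElem _ _ hi', List.getElem_zipWith, pvComb, pvV_pvChr,
      List.getElem_tail, List.getD_eq_getElem _ _ h1, List.getD_eq_getElem _ _ h1']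
  unfold pvF
  rw [hds, hn]
  simp only [Nat.add_sub_cancel, show n + 2 - 1 = n + 1 from rfl]
  have hsum : ∑ i ∈ Finset.range (n + 1),
        (Nat.choose n i : ZMod 3) * pvV ((List.zipWith pvComb cs cs.tail).getD i 'r')
      = -(∑ j ∈ Finset.range (n + 2), (Nat.choose (n + 1) j : ZMod 3) * pvV (cs.getD j 'r')) := by
    rw [Finset.sum_congr rfl (fun i hi => by rw [hgd i (Finset.mem_range.mp hi)])]
    rw [pvSumPascal (fun j => pvV (cs.getD j 'r')) n]
    simp only [mul_neg, mul_add, neg_add]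
    rw [Finset.sum_add_distrib]
    simp [Finset.sum_neg_distrib]
  rw [hsum]
  ring

theorem pvA_closed : ∀ (fuel : Nat) (cs : List Char), cs ≠ [] → (∀ c ∈ cs, pvRYB c) →
    cs.length < fuel → colourTrioAux fuel cs = String.singleton (pvChr (pvF cs)) := by
  intro fuel
  induction fuel with
  | zero => intro cs _ _ h; omega
  | succ f ih =>
    intro cs hne hryb hlt
    rw [colourTrioAux]
    by_cases h1 : cs.length = 1
    · rw [if_pos h1]
      obtain ⟨c, rfl⟩ : ∃ c, cs = [c] := by
        match cs, h1 with | [c], _ => exact ⟨c, rfl⟩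
      have hF : pvF [c] = pvV c := by simp [pvF]
      rw [hF, pvChr_pvV (hryb c (by simp))]
      rfl
    · rw [if_neg h1]
      have h0 : 0 < cs.length := List.length_pos_of_ne_nil hne
      have h2 : 2 ≤ cs.length := by omega
      rw [pvStepA_ryb cs hryb]
      have hlen : (List.zipWith pvComb cs cs.tail).length = cs.length - 1 := by
        simp [List.length_zipWith, List.length_tail]
      rw [ih _ (by rw [← List.length_pos_iff]; omega)
        (by
          intro c hc
          rw [List.mem_iff_getElem] at hc
          obtain ⟨i, hi, rfl⟩ := hc
          rw [List.getElem_zipWith]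
          exact pvRYB_pvChr _)
        (by omega)]
      rw [pvF_step cs h2]

-- Lucas: pvBinom3 computes the binomial coefficient mod 3
theorem pvPasc_eq (a b : Nat) (ha : a < 3) (hb : b < 3) :
    (pvPasc a b : ZMod 3) = (Nat.choose a b : ZMod 3) := by
  interval_cases a <;> interval_cases b <;> decide

theorem pvBinom3_eq (n k : Nat) : (pvBinom3 n k : ZMod 3) = (Nat.choose n k : ZMod 3) := by
  haveI : Fact (Nat.Prime 3) := ⟨by norm_num⟩
  fun_induction pvBinom3 n k with
  | case1 n k h => obtain ⟨rfl, rfl⟩ := h; simp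
  | case2 n k h hlt =>
    have lucas : (Nat.choose n k : ZMod 3)
        = ((Nat.choose (n % 3) (k % 3) * Nat.choose (n / 3) (k / 3) : ℕ) : ZMod 3) :=
      (ZMod.natCast_eq_natCast_iff _ _ _).mpr Choose.choose_modEq_choose_mod_mul_choose_div_nat
    rw [lucas, Nat.choose_eq_zero_of_lt hlt]
    simp
  | case3 n k h hge ih =>
    have lucas : (Nat.choose n k : ZMod 3)
        = ((Nat.choose (n % 3) (k % 3) * Nat.choose (n / 3) (k / 3) : ℕ) : ZMod 3) :=
      (ZMod.natCast_eq_natCast_iff _ _ _).mpr Choose.choose_modEq_choose_mod_mul_choose_div_nat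
    rw [lucas]
    rw [ZMod.natCast_mod, Nat.cast_mul, ih,
      pvPasc_eq _ _ (Nat.mod_lt _ (by norm_num)) (Nat.mod_lt _ (by norm_num))]
    push_cast
    ring

theorem pvVal_cast {c : Char} (h : pvRYB c) : (pvVal c : ZMod 3) = pvV c := by
  rcases h with h | h | h <;> subst h <;> decide

theorem pvFoldMod (m : ℕ) : ∀ (l : List (Char × ℕ)) (a : ℕ), a < 3 →
    l.foldl (fun s p => (s + pvBinom3 m p.2 * pvVal p.1) % 3) a
      = (a + (l.map (fun p => pvBinom3 m p.2 * pvVal p.1)).sum) % 3 := by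
  intro l
  induction l with
  | nil => intro a ha; simp [Nat.mod_eq_of_lt ha]
  | cons p t ih =>
    intro a ha
    rw [List.foldl_cons, ih _ (Nat.mod_lt _ (by norm_num)), List.map_cons, List.sum_cons,
      Nat.mod_add_mod]
    omega

theorem pvZipIdxSum (g : ℕ → Char → ZMod 3) : ∀ (cs : List Char) (k : ℕ),
    ((cs.zipIdx k).map (fun p => g p.2 p.1)).sum
      = ∑ i ∈ Finset.range cs.length, g (k + i) (cs.getD i 'r') := by
  intro cs
  induction cs with
  | nil => intro k; simp
  | cons c t ih =>
    intro k
    rw [List.zipIdx_cons, List.map_cons, List.sum_cons, ih (k + 1), List.length_cons,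
      Finset.sum_range_succ']
    simp only [List.getD_cons_succ, List.getD_cons_zero, Nat.add_zero]
    rw [add_comm]
    congr 1
    refine Finset.sum_congr rfl (fun i _ => ?_)
    congr 1
    omega

theorem pvB_closed (cs : List Char) (h2 : 2 ≤ cs.length) (h : ∀ c ∈ cs, pvRYB c)
    (color : String) (hcs : color.toList = cs) :
    colourTrio_alt color = String.singleton (pvChr (pvF cs)) := by
  have hne1 : ¬ (cs.length = 1) := by omega
  simp only [colourTrio_alt, hcs, if_neg hne1]
  set m := cs.length - 1 with hm
  have hfold : (cs.zipIdx.foldl (fun s p => (s + pvBinom3 m p.2 * pvVal p.1) % 3) 0)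
      = ((cs.zipIdx.map (fun p => pvBinom3 m p.2 * pvVal p.1)).sum) % 3 := by
    simpa using pvFoldMod m cs.zipIdx 0 (by norm_num)
  rw [hfold]
  set s0 := ((cs.zipIdx.map (fun p => pvBinom3 m p.2 * pvVal p.1)).sum) % 3 with hs0
  have hs0lt : s0 < 3 := Nat.mod_lt _ (by norm_num)
  have hcast : (s0 : ZMod 3)
      = ∑ i ∈ Finset.range cs.length, (Nat.choose m i : ZMod 3) * pvV (cs.getD i 'r') := by
    rw [hs0, ZMod.natCast_mod, Nat.cast_list_sum, List.map_map]
    rw [show ((Nat.cast : ℕ → ZMod 3) ∘ fun p : Char × ℕ => pvBinom3 m p.2 * pvVal p.1)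
        = fun p : Char × ℕ => ((pvBinom3 m p.2 * pvVal p.1 : ℕ) : ZMod 3) from rfl]
    rw [pvZipIdxSum (fun i c => ((pvBinom3 m i * pvVal c : ℕ) : ZMod 3)) cs 0]
    refine Finset.sum_congr rfl (fun i hi => ?_)
    have hilt : i < cs.length := Finset.mem_range.mp hi
    have hmem : cs.getD i 'r' ∈ cs := by
      rw [List.getD_eq_getElem _ _ hilt]; exact List.getElem_mem hilt
    rw [Nat.zero_add, Nat.cast_mul, pvBinom3_eq, pvVal_cast (h _ hmem)]
  have hpvF : pvF cs = (-1) ^ m * (s0 : ZMod 3) := by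
    rw [pvF, hcast, ← hm]
  have hchr : ∀ t : ℕ, t < 3 →
      (match PySem.Str.pyGet? "ryb" (t : Int) with
        | some c => String.singleton c
        | none => "") = String.singleton (pvChr ((t : ℕ) : ZMod 3)) := by
    intro t ht; interval_cases t <;> decide
  have hneg : ∀ t : ℕ, t < 3 → (((3 - t) % 3 : ℕ) : ZMod 3) = -((t : ℕ) : ZMod 3) := by
    intro t ht; interval_cases t <;> decide
  by_cases hpar : m % 2 = 1
  · rw [if_pos hpar, hchr _ (by omega)]
    have hval : (((3 - s0) % 3 : ℕ) : ZMod 3) = pvF cs := by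
      rw [hneg _ hs0lt, hpvF, Odd.neg_one_pow (Nat.odd_iff.mpr hpar), neg_one_mul]
    rw [hval]
  · rw [if_neg hpar, hchr _ hs0lt]
    have hval : ((s0 : ℕ) : ZMod 3) = pvF cs := by
      rw [hpvF, Even.neg_one_pow (Nat.even_iff.mpr (by omega)), one_mul]
    rw [hval]

-- ===== VERDICT (by name: the statement is the Claim_ definition above) =====
theorem colourTrio_spec : Claim_equal_colourTrio := by
  intro color _ hpre
  unfold Spec_colourTrio
  rcases hpre with h1 | ⟨h2, hall⟩
  · obtain ⟨c, hc⟩ := List.length_eq_one_iff.mp h1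
    rw [colourTrio, colourTrio_alt, hc]
    simp only [List.length_singleton]
    exact (String.ext (by simp [colourTrioAux, String.toList_singleton, hc])).symm
  · have hryb : ∀ c ∈ color.toList, pvRYB c := by
      intro c hc
      have := List.all_eq_true.mp hall c hc
      unfold pvRYB
      simp only [Bool.or_eq_true, decide_eq_true_eq] at this
      tauto
    have hne : color.toList ≠ [] := by
      intro hnil; rw [hnil] at h2; simp at h2
    rw [colourTrio, pvA_closed (color.toList.length + 1) color.toList hne hryb (by omega),
      pvB_closed color.toList h2 hryb color rfl]
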